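-- pv_equiv track=rewrite | github.com/Molaison/vdRIF | scripts/06_rif_export/01_export_rif_inputs.py | _first_two_bits
-- ===== SOURCE A (Python) =====
-- def _first_two_bits(mask_u16: int) -> tuple[int, int]:
--     bits = []
--     for b in range(16):
--         if (mask_u16 >> b) & 1:
--             bits.append(b)
--             if len(bits) == 2:
--                 break
--     if not bits:
--         return -1, -1
--     if len(bits) == 1:
--         return bits[0], -1
--     return bits[0], bits[1]
-- ===== SOURCE B (Python) =====
-- def _first_two_bits(mask_u16: int) -> tuple[int, int]:
--     m = mask_u16 & 0xFFFF
--     if m == 0: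
--         return -1, -1
--     lsb = m & -m
--     first = lsb.bit_length() - 1
--     m &= m - 1
--     if m == 0:
--         return first, -1
--     lsb = m & -m
--     return first, lsb.bit_length() - 1
-- ===== Notes on version B (the rewrite author's own statement) =====
-- stated objective: idiomatic
-- what changed: B replaces A's position-by-position scan (building a list with an early break) by direct bit tricks: mask to the low word, extract the lowest set bit twice via m & -m and bit_length, clearing it in between with m & (m-1).
import Mathlib
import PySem

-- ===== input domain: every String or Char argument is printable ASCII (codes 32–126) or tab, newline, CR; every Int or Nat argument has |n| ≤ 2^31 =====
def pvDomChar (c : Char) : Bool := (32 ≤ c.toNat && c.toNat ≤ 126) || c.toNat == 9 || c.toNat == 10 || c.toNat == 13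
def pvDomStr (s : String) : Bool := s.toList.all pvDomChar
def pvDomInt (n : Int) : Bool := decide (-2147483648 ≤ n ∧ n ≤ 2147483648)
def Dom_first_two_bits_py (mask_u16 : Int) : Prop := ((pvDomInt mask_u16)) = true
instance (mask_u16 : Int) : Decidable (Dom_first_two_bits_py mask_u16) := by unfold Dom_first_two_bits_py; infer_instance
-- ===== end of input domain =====

-- B extracts the (at most two) lowest set bits of mask & 0xFFFF directly with
-- lsb = m & -m / bit_length, instead of A's scan over all 16 bit positions:
-- objective 'idiomatic'; same result on every int input, both functions are total.

-- ===== PORT A =====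
-- the for-loop over range(16) with its append / len==2 break; b ∈ [0,16) so b.toNat is exact for Python's `mask >> b`
def ftbLoop (mask : Int) : List Int → List Int → List Int
  | [], bits => bits
  | b :: rest, bits =>
    if PySem.Int.band (mask >>> b.toNat) 1 ≠ 0 then
      let bits' := bits ++ [b]
      if bits'.length = 2 then bits' else ftbLoop mask rest bits'
    else ftbLoop mask rest bits

def first_two_bits_py (mask_u16 : Int) : Int × Int :=
  let bits := ftbLoop mask_u16 (PySem.List.pyRange 0 16 1) []
  if bits = [] then (-1, -1)
  else if bits.length = 1 then ((PySem.List.pyGet? bits 0).getD 0, -1)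
  else ((PySem.List.pyGet? bits 0).getD 0, (PySem.List.pyGet? bits 1).getD 0)

-- ===== PORT B =====
-- lsb.bit_length() - 1 is ported literally as bitLength lsb - 1
def first_two_bits_py_alt (mask_u16 : Int) : Int × Int :=
  let m := PySem.Int.band mask_u16 65535
  if m = 0 then (-1, -1)
  else
    let lsb := PySem.Int.band m (-m)
    let first : Int := (PySem.Int.bitLength lsb : Int) - 1
    let m2 := PySem.Int.band m (m - 1)
    if m2 = 0 then (first, -1)
    else
      let lsb2 := PySem.Int.band m2 (-m2)
      (first, (PySem.Int.bitLength lsb2 : Int) - 1)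

-- ===== PRECONDITION & SPEC =====
def Spec_first_two_bits_py (mask_u16 : Int) (out : Int × Int) : Prop := out = first_two_bits_py_alt mask_u16
instance (mask_u16 : Int) (out : Int × Int) : Decidable (Spec_first_two_bits_py mask_u16 out) := by unfold Spec_first_two_bits_py; infer_instance

-- ===== CLAIM (what is proved, stated in full; the proofs are below) =====
def Claim_equal_first_two_bits_py : Prop := ∀ (mask_u16 : Int), Dom_first_two_bits_py mask_u16 → Spec_first_two_bits_py mask_u16 (first_two_bits_py mask_u16)

-- ===== LEMMAS AND PROOFS =====

lemma tb_two_mul (r d : Nat) : (2*r).testBit (d+1) = r.testBit d := by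
  have := Nat.testBit_succ (2*r) d
  simpa [Nat.mul_div_cancel_left] using this

lemma tb_two_mul_add_one (r d : Nat) : (2*r+1).testBit (d+1) = r.testBit d := by
  have := Nat.testBit_succ (2*r+1) d
  have e : (2*r+1)/2 = r := by omega
  simpa [e] using this

lemma land_pred (i r : Nat) : (2^i*(2*r+1)) &&& (2^i*(2*r+1) - 1) = 2^(i+1)*r := by
  apply Nat.eq_of_testBit_eq
  intro k
  have hp : 0 < 2^i := Nat.two_pow_pos i
  have hn1 : 2^i*(2*r+1) - 1 = 2^i * (2*r) + (2^i - 1) := by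
    have e : 2^i*(2*r+1) = 2^i*(2*r) + 2^i := by ring
    omega
  rw [Nat.testBit_and, hn1,
    Nat.testBit_two_pow_mul_add _ (by omega : 2^i - 1 < 2^i) k,
    Nat.testBit_two_pow_mul, Nat.testBit_two_pow_mul]
  rcases Nat.lt_trichotomy k i with hk | hk | hk
  · simp [hk, Nat.not_le.mpr hk]
    exact fun h => absurd h (by omega)
  · subst hk
    simp [Nat.testBit_zero, Nat.mul_mod_right, show ¬ (k + 1 ≤ k) from by omega]
  · obtain ⟨d, hd⟩ : ∃ d, k = i + 1 + d := ⟨k - i - 1, by omega⟩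
    subst hd
    have e1 : i + 1 + d - i = d + 1 := by omega
    have e2 : i + 1 + d - (i + 1) = d := by omega
    simp [e1, e2, show i ≤ i + 1 + d from by omega, show i + 1 ≤ i + 1 + d from by omega,
      if_neg (show ¬ (i + 1 + d < i) from by omega), tb_two_mul, tb_two_mul_add_one]

lemma band_neg_self (n : Nat) (hn : 0 < n) :
    PySem.Int.band (n : Int) (-(n : Int)) = ((n - (n &&& (n - 1)) : Nat) : Int) := by
  simp only [PySem.Int.band, if_pos (by positivity : (0:Int) ≤ (n:Int)),
    if_neg (by omega : ¬ (0:Int) ≤ -(n:Int))]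
  rw [neg_neg]
  have e1 : ((n:Int)).toNat = n := Int.toNat_natCast n
  have e2 : ((n:Int) - 1).toNat = n - 1 := by omega
  rw [e1, e2]

lemma bitLength_two_pow (i : Nat) : PySem.Int.bitLength ((2^i : Nat) : Int) = i + 1 := by
  induction i with
  | zero => decide
  | succ k ih =>
    rw [PySem.Int.bitLength_natCast (Nat.two_pow_pos (k+1))]
    have e : 2^(k+1)/2 = 2^k := by omega
    rw [e, ih]

lemma band_shift_one (n b : Nat) :
    PySem.Int.band ((n : Int) >>> b) 1 = if n.testBit b then 1 else 0 := by
  rw [← Int.natCast_shiftRight, show (1:Int) = ((1:Nat):Int) from rfl, PySem.Int.band_natCast]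
  rw [Nat.and_one_is_mod, Nat.shiftRight_eq_div_pow]
  rw [Nat.testBit_eq_decide_div_mod_eq]
  rcases Nat.lt_or_ge (n / 2^b % 2) 2 with h | h
  · interval_cases h : n / 2^b % 2 <;> simp
  · exfalso; omega

lemma nat_and_65535 (n : Nat) : n &&& 65535 = n % 65536 := by
  have := Nat.and_two_pow_sub_one_eq_mod n 16
  norm_num at this
  exact this

-- clearing the lowest set bit:  (2^i*(2r+1)) & (2^i*(2r+1)-1) = 2^(i+1)*r

lemma band_65535_eq_emod (a : Int) : PySem.Int.band a 65535 = a % 65536 := by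
  have e : Int.toNat 65535 = 65535 := rfl
  rcases le_or_gt 0 a with h | h
  · simp only [PySem.Int.band, if_pos h, if_pos (by norm_num : (0:Int) ≤ 65535), e,
      nat_and_65535]
    omega
  · simp only [PySem.Int.band, if_neg (by omega : ¬ (0:Int) ≤ a),
      if_pos (by norm_num : (0:Int) ≤ 65535), e, Nat.and_comm, nat_and_65535]
    omega

-- Python's  n & -n  on a positive n, in Nat terms

lemma bittest_emod (a : Int) (b : Nat) (hb : b < 16) :
    PySem.Int.band (a >>> b) 1 = PySem.Int.band ((a % 65536) >>> b) 1 := by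
  rw [PySem.Int.band_one, PySem.Int.band_one,
    PySem.Int.mod_eq_emod_of_pos (by norm_num), PySem.Int.mod_eq_emod_of_pos (by norm_num),
    Int.shiftRight_eq_div_pow, Int.shiftRight_eq_div_pow]
  push_cast
  have hbb : (2:Int) ^ (16 - b) * 2 ^ b = 65536 := by
    rw [← pow_add]
    norm_num [Nat.sub_add_cancel (by omega : b ≤ 16)]
  have hsplit : a = a % 65536 + (2 ^ (16 - b) * (a / 65536)) * 2 ^ b := by
    rw [mul_comm ((2:Int) ^ (16 - b)) (a / 65536), mul_assoc, hbb]
    omega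
  have hpow : (2:Int) ^ (16 - b) * (a / 65536) = (2 ^ (15 - b) * (a / 65536)) * 2 := by
    rw [mul_comm _ (2:Int), ← mul_assoc, ← pow_succ']
    congr 2
    omega
  conv_lhs => rw [hsplit]
  rw [Int.add_mul_ediv_right _ _ (by positivity : (2:Int) ^ b ≠ 0), hpow]
  rw [mul_comm ((2:Int) ^ (15 - b) * (a / 65536)) 2, Int.add_mul_emod_self_left]

-- ---- loop lemmas ----

lemma ftbLoop_skip (a : Int) (l1 l2 bits : List Int)
    (h : ∀ b ∈ l1, PySem.Int.band (a >>> b.toNat) 1 = 0) :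
    ftbLoop a (l1 ++ l2) bits = ftbLoop a l2 bits := by
  induction l1 with
  | nil => rfl
  | cons b rest ih =>
    have hb := h b (List.mem_cons_self ..)
    simp only [List.cons_append, ftbLoop, hb, ne_eq, not_true_eq_false, if_false]
    exact ih fun x hx => h x (List.mem_cons_of_mem _ hx)

lemma ftbLoop_hit1 (a : Int) (b : Int) (l : List Int)
    (hb : PySem.Int.band (a >>> b.toNat) 1 ≠ 0) :
    ftbLoop a (b :: l) [] = ftbLoop a l [b] := by
  simp [ftbLoop, hb]

lemma ftbLoop_hit2 (a : Int) (b c : Int) (l : List Int)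
    (hb : PySem.Int.band (a >>> b.toNat) 1 ≠ 0) :
    ftbLoop a (b :: l) [c] = [c, b] := by
  simp [ftbLoop, hb]

lemma map_range_split {A : Type} (f : Nat → A) (d M : Nat) (h : d < M) :
    (List.range M).map f =
      ((List.range d).map f) ++ f d ::
        (List.range (M - d - 1)).map (fun t => f (d + 1 + t)) := by
  conv_lhs => rw [show M = d + (M - d - 1 + 1) by omega, List.range_add, List.range_succ_eq_map]
  rw [List.map_append, List.map_map, List.map_cons, List.map_map]
  congr 1
  congr 1
  all_goals simp
  intro a _
  congr 1
  omega

lemma pyRange16 : PySem.List.pyRange 0 16 1 = (List.range 16).map Int.ofNat := by decide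

lemma A_one (i : Nat) (hi : i < 16) :
    first_two_bits_py ((2^i : Nat) : Int) = ((i : Int), -1) := by
  have hskip1 : ∀ b ∈ (List.range i).map Int.ofNat,
      PySem.Int.band (((2^i : Nat) : Int) >>> b.toNat) 1 = 0 := by
    intro b hb
    simp only [List.mem_map, List.mem_range] at hb
    obtain ⟨k, hk, rfl⟩ := hb
    rw [show (Int.ofNat k).toNat = k from rfl, band_shift_one]
    simp [Nat.testBit_two_pow]
    omega
  have hhit : PySem.Int.band (((2^i : Nat) : Int) >>> (Int.ofNat i).toNat) 1 ≠ 0 := by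
    rw [show (Int.ofNat i).toNat = i from rfl, band_shift_one]
    simp [Nat.testBit_two_pow]
  have hskip2 : ∀ b ∈ (List.range (16 - i - 1)).map (fun t => Int.ofNat (i + 1 + t)),
      PySem.Int.band (((2^i : Nat) : Int) >>> b.toNat) 1 = 0 := by
    intro b hb
    simp only [List.mem_map, List.mem_range] at hb
    obtain ⟨k, hk, rfl⟩ := hb
    rw [show (Int.ofNat (i+1+k)).toNat = i+1+k from rfl, band_shift_one]
    simp [Nat.testBit_two_pow]
    omega
  unfold first_two_bits_py
  rw [pyRange16, map_range_split Int.ofNat i 16 hi, ftbLoop_skip _ _ _ _ hskip1, ftbLoop_hit1 _ _ _ hhit,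
    ← List.append_nil ((List.range (16 - i - 1)).map _), ftbLoop_skip _ _ _ _ hskip2]
  simp [ftbLoop, PySem.List.pyGet?, PySem.List.pyIdx?]

lemma A_two (i d s : Nat) (h : i + 1 + d < 16) :
    first_two_bits_py ((2^i * (2 * (2^d * (2*s+1)) + 1) : Nat) : Int)
      = ((i : Int), ((i + 1 + d : Nat) : Int)) := by
  set o := 2^d * (2*s+1) with ho
  set n := 2^i * (2*o+1) with hn
  have hskip1 : ∀ b ∈ (List.range i).map Int.ofNat,
      PySem.Int.band ((n : Int) >>> b.toNat) 1 = 0 := by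
    intro b hb
    simp only [List.mem_map, List.mem_range] at hb
    obtain ⟨k, hk, rfl⟩ := hb
    rw [show (Int.ofNat k).toNat = k from rfl, band_shift_one, hn, Nat.testBit_two_pow_mul]
    simp [show ¬ (k ≥ i) from by omega]
  have hhit1 : PySem.Int.band ((n : Int) >>> (Int.ofNat i).toNat) 1 ≠ 0 := by
    rw [show (Int.ofNat i).toNat = i from rfl, band_shift_one, hn, Nat.testBit_two_pow_mul]
    simp [Nat.testBit_zero]
    all_goals omega
  have hskip2 : ∀ b ∈ (List.range d).map (fun t => Int.ofNat (i + 1 + t)),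
      PySem.Int.band ((n : Int) >>> b.toNat) 1 = 0 := by
    intro b hb
    simp only [List.mem_map, List.mem_range] at hb
    obtain ⟨k, hk, rfl⟩ := hb
    rw [show (Int.ofNat (i+1+k)).toNat = i+1+k from rfl, band_shift_one, hn,
      Nat.testBit_two_pow_mul]
    have e : i + 1 + k - i = k + 1 := by omega
    rw [e]
    simp [tb_two_mul_add_one, ho, Nat.testBit_two_pow_mul, show ¬ (k ≥ d) from by omega]
  have hhit2 : PySem.Int.band ((n : Int) >>> (Int.ofNat (i + 1 + d)).toNat) 1 ≠ 0 := by
    rw [show (Int.ofNat (i+1+d)).toNat = i+1+d from rfl, band_shift_one, hn,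
      Nat.testBit_two_pow_mul]
    have e : i + 1 + d - i = d + 1 := by omega
    rw [e]
    simp [tb_two_mul_add_one, ho, Nat.testBit_two_pow_mul, Nat.testBit_zero]
    all_goals omega
  unfold first_two_bits_py
  rw [pyRange16, map_range_split Int.ofNat i 16 (by omega), ftbLoop_skip _ _ _ _ hskip1,
    ftbLoop_hit1 _ _ _ hhit1,
    map_range_split (fun t => Int.ofNat (i + 1 + t)) d (16 - i - 1) (by omega),
    ftbLoop_skip _ _ _ _ hskip2, ftbLoop_hit2 _ _ _ _ hhit2]
  simp [PySem.List.pyGet?, PySem.List.pyIdx?]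

lemma band_mask_eq (n : Nat) (hn : n < 65536) : PySem.Int.band (n : Int) 65535 = (n : Int) := by
  rw [show (65535 : Int) = ((65535 : Nat) : Int) from rfl, PySem.Int.band_natCast,
    nat_and_65535, Nat.mod_eq_of_lt hn]

lemma B_one (i : Nat) (hi : i < 16) :
    first_two_bits_py_alt ((2^i : Nat) : Int) = ((i : Int), -1) := by
  have hlt : 2^i < 65536 := by
    calc 2^i < 2^16 := Nat.pow_lt_pow_right (by omega) hi
    _ = 65536 := by norm_num
  have hp : 0 < 2^i := Nat.two_pow_pos i
  have hm := band_mask_eq (2^i) hlt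
  have hand : 2^i &&& (2^i - 1) = 0 := by
    have := land_pred i 0
    simpa using this
  have hlsb : PySem.Int.band ((2^i : Nat) : Int) (-((2^i : Nat) : Int)) = ((2^i : Nat) : Int) := by
    rw [band_neg_self _ hp, hand]
    norm_num
  have hm2 : PySem.Int.band ((2^i : Nat) : Int) (((2^i : Nat) : Int) - 1) = 0 := by
    rw [show ((2^i : Nat) : Int) - 1 = ((2^i - 1 : Nat) : Int) from by omega,
      PySem.Int.band_natCast, hand]
    rfl
  simp only [first_two_bits_py_alt, hm, hlsb, hm2, bitLength_two_pow,
    if_neg (show ¬ ((2^i : Nat) : Int) = 0 from by positivity), if_pos trivial, ite_true]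
  rw [Prod.mk.injEq]
  refine ⟨by push_cast; ring, rfl⟩

lemma B_two (i d s : Nat) (h : i + 1 + d < 16) (hn : 2^i * (2 * (2^d * (2*s+1)) + 1) < 65536) :
    first_two_bits_py_alt ((2^i * (2 * (2^d * (2*s+1)) + 1) : Nat) : Int)
      = ((i : Int), ((i + 1 + d : Nat) : Int)) := by
  set o := 2^d * (2*s+1) with ho
  set n := 2^i * (2*o+1) with hnd
  have hp : 0 < n := by positivity
  have hm := band_mask_eq n hn
  have hand : n &&& (n - 1) = 2^(i+1) * o := land_pred i o
  have hsub : n - 2^(i+1) * o = 2^i := by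
    have e : n = 2^(i+1) * o + 2^i := by rw [hnd, pow_succ]; ring
    rw [e]
    exact Nat.add_sub_cancel_left _ _
  have hlsb : PySem.Int.band (n : Int) (-(n : Int)) = ((2^i : Nat) : Int) := by
    rw [band_neg_self _ hp, hand, hsub]
  have hM : 2^(i+1) * o = 2^(i+1+d) * (2*s+1) := by rw [ho, ← mul_assoc, ← pow_add]
  have hM0 : 0 < 2^(i+1) * o := by rw [hM]; positivity
  have hm2 : PySem.Int.band (n : Int) ((n : Int) - 1) = ((2^(i+1) * o : Nat) : Int) := by
    rw [show ((n : Nat) : Int) - 1 = ((n - 1 : Nat) : Int) from by omega,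
      PySem.Int.band_natCast, hand]
  have hand2 : (2^(i+1) * o) &&& (2^(i+1) * o - 1) = 2^(i+1+d+1) * s := by
    rw [hM]
    exact land_pred (i+1+d) s
  have hsub2 : 2^(i+1) * o - 2^(i+1+d+1) * s = 2^(i+1+d) := by
    have e : 2^(i+1) * o = 2^(i+1+d+1) * s + 2^(i+1+d) := by rw [hM, pow_succ]; ring
    rw [e]
    exact Nat.add_sub_cancel_left _ _
  have hlsb2 : PySem.Int.band ((2^(i+1) * o : Nat) : Int) (-((2^(i+1) * o : Nat) : Int))
      = ((2^(i+1+d) : Nat) : Int) := by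
    rw [band_neg_self _ hM0, hand2, hsub2]
  simp only [first_two_bits_py_alt, hm, hlsb, hm2, hlsb2, bitLength_two_pow,
    if_neg (show ¬ ((n : Nat) : Int) = 0 from by positivity),
    if_neg (show ¬ ((2^(i+1) * o : Nat) : Int) = 0 from by positivity)]
  rw [Prod.mk.injEq]
  constructor <;> push_cast <;> ring

lemma ftbLoop_emod (a : Int) (l bits : List Int)
    (hl : ∀ b ∈ l, 0 ≤ b ∧ b < 16) :
    ftbLoop a l bits = ftbLoop (a % 65536) l bits := by
  induction l generalizing bits with
  | nil => rfl
  | cons b rest ih =>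
    have hb := hl b (List.mem_cons_self ..)
    have ht := bittest_emod a b.toNat (by omega)
    simp only [ftbLoop, ht]
    split_ifs
    · rfl
    · exact ih _ fun x hx => hl x (List.mem_cons_of_mem _ hx)
    · exact ih _ fun x hx => hl x (List.mem_cons_of_mem _ hx)

lemma A_emod (a : Int) : first_two_bits_py a = first_two_bits_py (a % 65536) := by
  unfold first_two_bits_py
  rw [ftbLoop_emod a _ _ (by decide)]

lemma B_emod (a : Int) : first_two_bits_py_alt a = first_two_bits_py_alt (a % 65536) := by
  unfold first_two_bits_py_alt
  rw [band_65535_eq_emod, band_65535_eq_emod, Int.emod_emod_of_dvd a dvd_rfl]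

-- ---- the range list and its splits ----

lemma A_zero : first_two_bits_py ((0:Nat) : Int) = (-1, -1) := by decide

lemma B_zero : first_two_bits_py_alt ((0:Nat) : Int) = (-1, -1) := by decide

-- ===== VERDICT (by name: the statement is the Claim_ definition above) =====
theorem first_two_bits_py_spec : Claim_equal_first_two_bits_py := by
  intro mask _
  unfold Spec_first_two_bits_py
  rw [A_emod mask, B_emod mask]
  have h1 : (0:Int) ≤ mask % 65536 := Int.emod_nonneg _ (by norm_num)
  have h2 : mask % 65536 < 65536 := Int.emod_lt_of_pos _ (by norm_num)
  obtain ⟨n, hn⟩ : ∃ n : Nat, mask % 65536 = (n : Int) := ⟨(mask % 65536).toNat, (Int.toNat_of_nonneg h1).symm⟩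
  have hn16 : n < 65536 := by omega
  rw [hn]
  rcases Nat.eq_zero_or_pos n with h0 | hpos
  · subst h0; rw [A_zero, B_zero]
  · obtain ⟨i, m, hodd, hnm⟩ := Nat.exists_eq_two_pow_mul_odd (Nat.pos_iff_ne_zero.mp hpos)
    obtain ⟨r, hr⟩ := hodd
    have hnm' : n = 2^i * (2*r+1) := by rw [hnm]; congr 1
    have hi : i < 16 := by
      have h2i : 2^i ≤ n := by
        calc 2^i ≤ 2^i * (2*r+1) := Nat.le_mul_of_pos_right _ (by omega)
        _ = n := hnm'.symm
      by_contra hc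
      push_neg at hc
      have h16 : 2^16 ≤ 2^i := Nat.pow_le_pow_right (by omega) hc
      have e : (2:Nat)^16 = 65536 := by norm_num
      omega
    rcases Nat.eq_zero_or_pos r with hr0 | hrpos
    · subst hr0
      simp only [hnm', mul_zero, zero_add, mul_one]
      rw [A_one i hi, B_one i hi]
    · obtain ⟨d, m', hodd', hrm⟩ := Nat.exists_eq_two_pow_mul_odd (Nat.pos_iff_ne_zero.mp hrpos)
      obtain ⟨s, hs⟩ := hodd'
      have hrm' : r = 2^d * (2*s+1) := by rw [hrm]; congr 1
      have hj : i + 1 + d < 16 := by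
        have h2j : 2^(i+1+d) ≤ n := by
          have e2 : 2^d ≤ 2^d * (2*s+1) := Nat.le_mul_of_pos_right _ (by omega)
          calc 2^(i+1+d) = 2^i * (2 * 2^d) := by ring
          _ ≤ 2^i * (2 * (2^d * (2*s+1))) := by
                exact Nat.mul_le_mul_left _ (Nat.mul_le_mul_left _ e2)
          _ ≤ 2^i * (2 * (2^d * (2*s+1)) + 1) := Nat.mul_le_mul_left _ (by omega)
          _ = n := by rw [hnm', hrm']
        by_contra hc
        push_neg at hc
        have h16 : 2^16 ≤ 2^(i+1+d) := Nat.pow_le_pow_right (by omega) hc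
        have e : (2:Nat)^16 = 65536 := by norm_num
        omega
      rw [hnm', hrm']
      rw [A_two i d s hj, B_two i d s hj (by rw [← hrm', ← hnm']; exact hn16)]
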